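-- pv_equiv track=rewrite | github.com/ajou-oss-superTeam/carbon_manger | ML/ocr_gas.py | check_rule_numeric_meteric
-- ===== SOURCE A (Python) =====
-- def check_rule_numeric_meteric(string):
--     numeric_front_only = False
--     metric_back = False
--     for char in string:
--         if(char.isdigit() or (char in ['.',','])):
--             numeric_front_only = True
--             if(metric_back):
--                 return False
--         elif(char in ['m','M']):
--             metric_back = True
--         else:
--             if(not (numeric_front_only and metric_back)):
--                 return False
--     return True if (numeric_front_only and metric_back) else False
-- ===== SOURCE B (Python) =====
-- def _is_num(c):
--     return c.isdigit() or c in ('.', ',')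
--
-- def check_rule_numeric_meteric(string):
--     i = 0
--     while i < len(string) and _is_num(string[i]):
--         i += 1
--     if i == 0 or i >= len(string) or string[i] not in ('m', 'M'):
--         return False
--     return not any(_is_num(c) for c in string[i + 1:])
-- ===== Notes on version B (the rewrite author's own statement) =====
-- stated objective: simpler
-- what changed: Replaced the single-pass two-flag state machine by a partition: advance over the numeric prefix, require a nonempty prefix followed by one metric delimiter letter, then check the suffix contains no numeric char.
import Mathlib
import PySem

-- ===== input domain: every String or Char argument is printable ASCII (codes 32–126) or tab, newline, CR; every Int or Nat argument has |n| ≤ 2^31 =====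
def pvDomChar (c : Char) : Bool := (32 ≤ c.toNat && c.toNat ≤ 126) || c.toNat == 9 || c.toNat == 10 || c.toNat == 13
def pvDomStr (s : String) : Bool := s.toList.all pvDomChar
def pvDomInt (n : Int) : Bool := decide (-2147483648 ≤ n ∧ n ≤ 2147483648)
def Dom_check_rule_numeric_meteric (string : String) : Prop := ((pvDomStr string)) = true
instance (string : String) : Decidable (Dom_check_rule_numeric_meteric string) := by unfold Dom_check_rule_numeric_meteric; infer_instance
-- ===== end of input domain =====

-- B partitions the string (numeric prefix, metric delimiter letter, non-numeric suffix) instead of A's two-flag state machine; objective: simpler.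

-- ===== PORT A =====
-- the loop of A: state (numeric_front_only, metric_back)
def pvALoop : List Char → Bool → Bool → Bool
  | [], nf, mb => nf && mb
  | c :: cs, nf, mb =>
    if PySem.Chars.isdigit c || c = '.' || c = ',' then
      (if mb then false else pvALoop cs true mb)
    else if c = 'm' || c = 'M' then
      pvALoop cs nf true
    else if !(nf && mb) then false
    else pvALoop cs nf mb

def check_rule_numeric_meteric (string : String) : Bool :=
  pvALoop string.toList false false

-- ===== PORT B =====
def pvIsNum (c : Char) : Bool := PySem.Chars.isdigit c || c = '.' || c = ','

-- B's while loop advancing i over the numeric prefix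
def pvPrefixLen : List Char → Nat
  | [] => 0
  | c :: cs => if pvIsNum c then pvPrefixLen cs + 1 else 0

def check_rule_numeric_meteric_alt (string : String) : Bool :=
  let cs := string.toList
  let i := pvPrefixLen cs
  if i = 0 then false
  else
    match cs.drop i with
    | [] => false
    | c :: rest => if c = 'm' || c = 'M' then !(rest.any pvIsNum) else false

-- ===== PRECONDITION & SPEC =====
def Spec_check_rule_numeric_meteric (string : String) (out : Bool) : Prop := out = check_rule_numeric_meteric_alt string
instance (string : String) (out : Bool) : Decidable (Spec_check_rule_numeric_meteric string out) := by unfold Spec_check_rule_numeric_meteric; infer_instance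

-- ===== CLAIM (what is proved, stated in full; the proofs are below) =====
def Claim_equal_check_rule_numeric_meteric : Prop := ∀ (string : String), Dom_check_rule_numeric_meteric string → Spec_check_rule_numeric_meteric string (check_rule_numeric_meteric string)

-- ===== LEMMAS AND PROOFS =====

-- in state (true,true): any numeric char fails, everything else is accepted
theorem pvALoop_tt (cs : List Char) : pvALoop cs true true = !(cs.any pvIsNum) := by
  induction cs with
  | nil => rfl
  | cons c cs ih =>
    simp only [pvALoop, pvIsNum, List.any_cons]
    by_cases h : (PySem.Chars.isdigit c || c = '.' || c = ',') = true <;> simp [h, ih, pvIsNum]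

-- in state (false,true): the result is always false
theorem pvALoop_ft (cs : List Char) : pvALoop cs false true = false := by
  induction cs with
  | nil => rfl
  | cons c cs ih =>
    simp only [pvALoop]
    by_cases h : (PySem.Chars.isdigit c || c = '.' || c = ',') = true <;> simp [h, ih]

-- in state (true,false): the remaining string must be (numeric prefix)(m/M)(non-numeric suffix)
theorem pvALoop_tf (cs : List Char) :
    pvALoop cs true false =
      (match cs.drop (pvPrefixLen cs) with
       | [] => false
       | c :: rest => if c = 'm' || c = 'M' then !(rest.any pvIsNum) else false) := by
  induction cs with
  | nil => rfl
  | cons c cs ih =>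
    by_cases h : pvIsNum c = true
    · have h' : (PySem.Chars.isdigit c || c = '.' || c = ',') = true := h
      simp only [pvALoop, pvPrefixLen, h, h', if_true, if_false, List.drop_succ_cons]
      exact ih
    · have h' : (PySem.Chars.isdigit c || c = '.' || c = ',') = false := by
        simpa [pvIsNum] using h
      simp only [pvALoop, pvPrefixLen, h, h', if_false, List.drop_zero, Bool.false_eq_true]
      by_cases hm : (c = 'm' || c = 'M') = true
      · simp [hm, pvALoop_tt]
      · simp [hm, pvALoop_ft]

-- ===== VERDICT (by name: the statement is the Claim_ definition above) =====
theorem check_rule_numeric_meteric_spec : Claim_equal_check_rule_numeric_meteric := by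
  intro s _
  unfold Spec_check_rule_numeric_meteric check_rule_numeric_meteric check_rule_numeric_meteric_alt
  cases hcs : s.toList with
  | nil => rfl
  | cons c cs =>
    by_cases h : pvIsNum c = true
    · have h' : (PySem.Chars.isdigit c || c = '.' || c = ',') = true := h
      simp only [pvALoop, pvPrefixLen, h, h', if_true, List.drop_succ_cons]
      simp [pvALoop_tf]
    · have h' : (PySem.Chars.isdigit c || c = '.' || c = ',') = false := by
        simpa [pvIsNum] using h
      simp only [pvALoop, pvPrefixLen, h, h', if_false, Bool.false_eq_true, if_true]
      by_cases hm : (c = 'm' || c = 'M') = true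
      · simp [hm, pvALoop_ft]
      · simp [hm]
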